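-- pv_equiv track=rewrite | github.com/wangyu-ustc/MemoryLLM | train/MemoryLLM/memoryllm/data/instruction.py | get_chunks
-- ===== SOURCE A (Python) =====
-- def get_chunks(lengths, max_length):
--
--     if len(lengths) == 1:
--         return [lengths]
--
--     if lengths[0] > max_length:
--         return [[lengths[0]], *get_chunks(lengths[1:], max_length)]
--
--     if sum(lengths) <= max_length:
--         return [lengths]
--
--     if lengths[0] + lengths[1] > max_length:
--         return [[lengths[0]], *get_chunks(lengths[1:], max_length)]
--     else:
--         # if we merge the first two numbers
--         solution1 = [[lengths[0], lengths[1]], *get_chunks(lengths[2:], max_length)]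
--
--         # if we don't merge the first two numbers
--         solution2 = [[lengths[0]], *get_chunks(lengths[1:], max_length)]
--
--         if len(solution1) > len(solution2):
--             return solution2
--         else:
--             return solution1
-- ===== SOURCE B (Python) =====
-- def get_chunks(lengths, max_length):
--     n = len(lengths)
--     # suffix sums: suff[i] == sum(lengths[i:])
--     suff = [0] * (n + 1)
--     for i in range(n - 1, -1, -1):
--         suff[i] = suff[i + 1] + lengths[i]
--     ONE, TWO, REST = 0, 1, 2   # emit [x] / emit pair / emit whole remaining suffix
--     kind = [REST] * n
--     cnt = [0] * (n + 2)        # cnt[i] = number of chunks in the best chunking of lengths[i:]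
--     for i in range(n - 1, -1, -1):
--         if i == n - 1:
--             kind[i] = REST; cnt[i] = 1
--         elif lengths[i] > max_length:
--             kind[i] = ONE; cnt[i] = 1 + cnt[i + 1]
--         elif suff[i] <= max_length:
--             kind[i] = REST; cnt[i] = 1
--         elif lengths[i] + lengths[i + 1] > max_length:
--             kind[i] = ONE; cnt[i] = 1 + cnt[i + 1]
--         elif cnt[i + 2] <= cnt[i + 1]:
--             kind[i] = TWO; cnt[i] = 1 + cnt[i + 2]
--         else:
--             kind[i] = ONE; cnt[i] = 1 + cnt[i + 1]
--     # reconstruct the chunking from the decision table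
--     out = []
--     i = 0
--     while i < n:
--         if kind[i] == REST:
--             out.append(lengths[i:]); break
--         elif kind[i] == ONE:
--             out.append([lengths[i]]); i += 1
--         else:
--             out.append([lengths[i], lengths[i + 1]]); i += 2
--     return out
-- ===== Notes on version B (the rewrite author's own statement) =====
-- stated objective: alternative
-- what changed: Replaces A's branching top-down recursion over the list by a bottom-up DP over suffix start indices: precomputed suffix sums, per-index chunk-count and decision tables, then one reconstruction walk (each suffix solved once instead of repeatedly).
import Mathlib
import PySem

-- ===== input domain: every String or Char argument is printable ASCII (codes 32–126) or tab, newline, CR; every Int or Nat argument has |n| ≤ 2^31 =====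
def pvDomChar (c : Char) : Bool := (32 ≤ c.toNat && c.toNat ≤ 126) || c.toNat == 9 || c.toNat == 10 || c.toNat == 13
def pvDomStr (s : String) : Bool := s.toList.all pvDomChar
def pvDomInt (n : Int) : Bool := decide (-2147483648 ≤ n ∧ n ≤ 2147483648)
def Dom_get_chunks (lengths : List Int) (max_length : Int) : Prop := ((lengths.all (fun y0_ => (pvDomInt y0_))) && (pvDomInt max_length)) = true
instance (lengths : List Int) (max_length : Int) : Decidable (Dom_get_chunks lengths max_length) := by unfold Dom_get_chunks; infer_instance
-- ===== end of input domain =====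

-- B: bottom-up DP over suffix start indices (suffix sums + decision/count tables) followed by
-- one reconstruction walk, instead of A's top-down branching recursion; each suffix solved once.

-- ===== PORT A =====
-- literal transliteration of A's recursion; A raises IndexError on [], excluded by Pre_
def get_chunks (lengths : List Int) (max_length : Int) : List (List Int) :=
  match lengths with
  | [] => []                                   -- unreachable under Pre_ (Python raises IndexError)
  | [x] => [[x]]                               -- if len(lengths) == 1: return [lengths]
  | a :: b :: t =>
    if a > max_length then
      [a] :: get_chunks (b :: t) max_length
    else if (a :: b :: t).sum ≤ max_length then
      [a :: b :: t]
    else if a + b > max_length then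
      [a] :: get_chunks (b :: t) max_length
    else
      let s1 := [a, b] :: get_chunks t max_length
      let s2 := [a] :: get_chunks (b :: t) max_length
      if s1.length > s2.length then s2 else s1

-- ===== PORT B =====
-- suff[i] = sum(lengths[i:]), built back to front as in Source B's first loop
def pySuffSums : List Int → List Int
  | [] => [0]
  | a :: t => (a + (pySuffSums t).headD 0) :: pySuffSums t

-- Source B's decision codes ONE / TWO / REST
inductive BKind : Type
  | one : BKind
  | two : BKind
  | rest : BKind
deriving DecidableEq, Repr

-- Source B's backward loop filling kind[i] and cnt[i]; entry for index i is the head,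
-- cnt[i+1]/cnt[i+2] are read off the already-built tail (default 0 = cnt past the end)
def bPlan (m : Int) : List Int → List Int → List (BKind × Nat)
  | [], _ => []
  | [_], _ => [(BKind.rest, 1)]                -- i == n-1: kind REST, cnt 1
  | _ :: _ :: _, [] => []                      -- unreachable: suff always long enough
  | a :: b :: t, s :: srest =>
    let rest := bPlan m (b :: t) srest
    let c1 := (rest.headD (BKind.rest, 0)).2
    let c2 := (rest.getD 1 (BKind.rest, 0)).2
    if a > m then (BKind.one, 1 + c1) :: rest
    else if s ≤ m then (BKind.rest, 1) :: rest
    else if a + b > m then (BKind.one, 1 + c1) :: rest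
    else if c2 ≤ c1 then (BKind.two, 1 + c2) :: rest
    else (BKind.one, 1 + c1) :: rest

-- Source B's reconstruction walk: advance through lengths and the plan by 1 or 2 positions
def bWalk : List Int → List (BKind × Nat) → List (List Int)
  | _, [] => []
  | L, (BKind.rest, _) :: _ => [L]             -- out.append(lengths[i:]); break
  | L, (BKind.one, _) :: rest =>
    match L with
    | [] => []                                 -- unreachable: plan is as long as lengths
    | a :: t => [a] :: bWalk t rest
  | L, (BKind.two, _) :: rest =>
    match L with
    | a :: b :: t => [a, b] :: bWalk t rest.tail
    | _ => []                                  -- unreachable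

def get_chunks_alt (lengths : List Int) (max_length : Int) : List (List Int) :=
  bWalk lengths (bPlan max_length lengths (pySuffSums lengths))

-- ===== PRECONDITION & SPEC =====
-- Pre_ excludes only the empty list, on which A (lengths[0]) raises IndexError.
def Pre_get_chunks (lengths : List Int) (_max_length : Int) : Prop := lengths ≠ []
instance (lengths : List Int) (max_length : Int) : Decidable (Pre_get_chunks lengths max_length) := by unfold Pre_get_chunks; infer_instance
def pvWitness_get_chunks : List Int × Int := ([3, 2, 4], 5)
def Spec_get_chunks (lengths : List Int) (max_length : Int) (out : List (List Int)) : Prop := out = get_chunks_alt lengths max_length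
instance (lengths : List Int) (max_length : Int) (out : List (List Int)) : Decidable (Spec_get_chunks lengths max_length out) := by unfold Spec_get_chunks; infer_instance

-- ===== CLAIM (what is proved, stated in full; the proofs are below) =====
def Claim_equal_get_chunks : Prop := ∀ (lengths : List Int) (max_length : Int), Dom_get_chunks lengths max_length → Pre_get_chunks lengths max_length → Spec_get_chunks lengths max_length (get_chunks lengths max_length)
-- ===== LEMMAS AND PROOFS =====

lemma pySuffSums_headD (L : List Int) : (pySuffSums L).headD 0 = L.sum := by
  induction L with
  | nil => simp [pySuffSums]
  | cons a t ih => rw [pySuffSums, List.headD_cons, ih, List.sum_cons]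

-- the plan of a list of length ≥ 1 is one entry followed by the plan of its tail's tail context
lemma bPlan_cons (m : Int) (b : Int) (t : List Int) :
    ∃ e, bPlan m (b :: t) (pySuffSums (b :: t)) = e :: bPlan m t (pySuffSums t) := by
  cases t with
  | nil => exact ⟨(BKind.rest, 1), by simp [bPlan]⟩
  | cons c t' =>
    rw [pySuffSums]
    simp only [bPlan]
    split_ifs <;> exact ⟨_, rfl⟩

lemma plan_spec (m : Int) : ∀ (L : List Int),
    ((bPlan m L (pySuffSums L)).headD (BKind.rest, 0)).2 = (get_chunks L m).length
    ∧ bWalk L (bPlan m L (pySuffSums L)) = get_chunks L m := by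
  have key : ∀ (n : Nat) (L : List Int), L.length ≤ n →
      ((bPlan m L (pySuffSums L)).headD (BKind.rest, 0)).2 = (get_chunks L m).length
      ∧ bWalk L (bPlan m L (pySuffSums L)) = get_chunks L m := by
    intro n
    induction n with
    | zero =>
      intro L hL
      have : L = [] := List.eq_nil_of_length_eq_zero (by omega)
      subst this
      simp [bPlan, bWalk, get_chunks]
    | succ n ih =>
      intro L hL
      match L with
      | [] => simp [bPlan, bWalk, get_chunks]
      | [a] => simp [bPlan, bWalk, get_chunks]
      | a :: b :: t =>
        have ih1 := ih (b :: t) (by simp at hL ⊢; omega)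
        have ih2 := ih t (by simp at hL ⊢; omega)
        obtain ⟨e, he⟩ := bPlan_cons m b t
        have hc1 : ((bPlan m (b :: t) (pySuffSums (b :: t))).headD (BKind.rest, 0)).2
            = (get_chunks (b :: t) m).length := ih1.1
        have hc2 : ((bPlan m (b :: t) (pySuffSums (b :: t))).getD 1 (BKind.rest, 0)).2
            = (get_chunks t m).length := by
          rw [he]
          cases hp : bPlan m t (pySuffSums t) with
          | nil =>
            have : t = [] := by
              cases t with
              | nil => rfl
              | cons c t' =>
                exfalso
                obtain ⟨e', he'⟩ := bPlan_cons m c t'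
                rw [he'] at hp
                simp at hp
            subst this
            simp [get_chunks]
          | cons p ps =>
            have := ih2.1
            rw [hp] at this
            simpa using this
        have hsum : pySuffSums (a :: b :: t)
            = ((a :: b :: t).sum) :: pySuffSums (b :: t) := by
          rw [pySuffSums, pySuffSums_headD]
          simp
        have hplan : bPlan m (a :: b :: t) (pySuffSums (a :: b :: t))
            = (let rest := bPlan m (b :: t) (pySuffSums (b :: t))
               let c1 := (rest.headD (BKind.rest, 0)).2
               let c2 := (rest.getD 1 (BKind.rest, 0)).2
               if a > m then (BKind.one, 1 + c1) :: rest
               else if (a :: b :: t).sum ≤ m then (BKind.rest, 1) :: rest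
               else if a + b > m then (BKind.one, 1 + c1) :: rest
               else if c2 ≤ c1 then (BKind.two, 1 + c2) :: rest
               else (BKind.one, 1 + c1) :: rest) := by
          rw [hsum]; rfl
        rw [hplan]
        simp only [hc1, hc2]
        rw [get_chunks]
        by_cases hgt : a > m
        · simp only [if_pos hgt, List.headD_cons, bWalk, ih1.2]
          exact ⟨by simp only [List.length_cons]; omega, by trivial⟩
        · simp only [if_neg hgt]
          by_cases hsle : (a :: b :: t).sum ≤ m
          · simp only [if_pos hsle, List.headD_cons, bWalk]
            exact ⟨by simp, by trivial⟩
          · simp only [if_neg hsle]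
            by_cases hab : a + b > m
            · simp only [if_pos hab, List.headD_cons, bWalk, ih1.2]
              exact ⟨by simp only [List.length_cons]; omega, by trivial⟩
            · simp only [if_neg hab, List.length_cons, gt_iff_lt]
              by_cases hle : (get_chunks t m).length ≤ (get_chunks (b :: t) m).length
              · simp only [if_pos hle, List.headD_cons, bWalk, he, List.tail_cons, ih2.2]
                rw [if_neg (by omega)]
                exact ⟨by simp only [List.length_cons]; omega, rfl⟩
              · simp only [if_neg hle, List.headD_cons, bWalk, ih1.2]
                rw [if_pos (by omega)]
                exact ⟨by simp only [List.length_cons]; omega, rfl⟩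
  intro L
  exact key L.length L le_rfl

-- ===== VERDICT (by name: the statement is the Claim_ definition above) =====
theorem get_chunks_spec : Claim_equal_get_chunks := by
  intro L m _ _
  unfold Spec_get_chunks get_chunks_alt
  exact ((plan_spec m L).2).symm
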